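-- pv_equiv track=rewrite | github.com/ThomasTrepanier/log6307-final-project | data/interim/stackoverflow/src/python/15_67.py | summer_69_Kelly2
-- ===== SOURCE A (Python) =====
-- def summer_69_Kelly2(lst):
--     it = iter(lst)
--     total = 0
--     for x in it:
--         if x == 6:
--             9 in it
--         else:
--             total += x
--     return total
-- ===== SOURCE B (Python) =====
-- def summer_69_Kelly2(lst):
--     total = 0
--     skip = False
--     for x in lst:
--         if skip:
--             if x == 9:
--                 skip = False
--         elif x == 6:
--             skip = True
--         else:
--             total += x
--     return total
-- ===== Notes on version B (the rewrite author's own statement) =====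
-- stated objective: idiomatic
-- what changed: Replaces A's iterator trick (a '9 in it' membership test that silently consumes the iterator up to the first 9) with one flat loop and an explicit boolean skip flag.
import Mathlib
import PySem

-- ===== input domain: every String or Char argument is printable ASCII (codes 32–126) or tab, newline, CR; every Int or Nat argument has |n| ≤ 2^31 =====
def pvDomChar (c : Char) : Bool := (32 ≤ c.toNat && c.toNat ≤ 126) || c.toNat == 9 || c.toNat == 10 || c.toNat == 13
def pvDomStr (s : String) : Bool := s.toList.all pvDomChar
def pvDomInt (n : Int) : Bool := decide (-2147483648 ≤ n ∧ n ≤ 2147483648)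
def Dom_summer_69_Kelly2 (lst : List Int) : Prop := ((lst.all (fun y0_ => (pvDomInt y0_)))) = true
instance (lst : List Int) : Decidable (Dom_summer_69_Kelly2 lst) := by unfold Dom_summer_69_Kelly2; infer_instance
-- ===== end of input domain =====

-- B replaces A's iterator-consuming '9 in it' trick with a flat loop and an explicit skip flag (idiomatic).


-- ===== PORT A =====
-- '9 in it' consumes the iterator up to and including the first 9 (or to the end): that is pvConsumeTo9
def pvConsumeTo9 : List Int → List Int
  | [] => []
  | x :: r => if x = 9 then r else pvConsumeTo9 r

theorem pvConsumeTo9_length_le : ∀ (l : List Int), (pvConsumeTo9 l).length ≤ l.length := by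
  intro l
  induction l with
  | nil => simp [pvConsumeTo9]
  | cons x r ih =>
    simp only [pvConsumeTo9]
    split
    · simp
    · exact Nat.le_trans ih (Nat.le_succ _)

-- the for-loop over the shared iterator, carrying total
def pvALoop (total : Int) : List Int → Int
  | [] => total
  | x :: rest =>
    if x = 6 then pvALoop total (pvConsumeTo9 rest)
    else pvALoop (total + x) rest
  termination_by l => l.length
  decreasing_by
  · exact Nat.lt_succ_of_le (pvConsumeTo9_length_le rest)
  · simp

def summer_69_Kelly2 (lst : List Int) : Int := pvALoop 0 lst

-- ===== PORT B =====
-- flat fold over the list with state (skip, total)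
def pvBStep (st : Bool × Int) (x : Int) : Bool × Int :=
  match st with
  | (skip, total) =>
    if skip then (if x = 9 then (false, total) else (true, total))
    else if x = 6 then (true, total)
    else (false, total + x)

def summer_69_Kelly2_alt (lst : List Int) : Int := (lst.foldl pvBStep (false, 0)).2

-- ===== PRECONDITION & SPEC =====
def Spec_summer_69_Kelly2 (lst : List Int) (out : Int) : Prop := out = summer_69_Kelly2_alt lst
instance (lst : List Int) (out : Int) : Decidable (Spec_summer_69_Kelly2 lst out) := by unfold Spec_summer_69_Kelly2; infer_instance

-- ===== CLAIM (what is proved, stated in full; the proofs are below) =====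
def Claim_equal_summer_69_Kelly2 : Prop := ∀ (lst : List Int), Dom_summer_69_Kelly2 lst → Spec_summer_69_Kelly2 lst (summer_69_Kelly2 lst)

-- ===== LEMMAS AND PROOFS =====

-- B's fold from skip=true behaves like A restarting after consuming to the first 9
theorem pvB_skip (l : List Int) : ∀ (t : Int),
    (List.foldl pvBStep (true, t) l).2 = (List.foldl pvBStep (false, t) (pvConsumeTo9 l)).2 := by
  induction l with
  | nil => intro t; simp [pvConsumeTo9]
  | cons x r ih =>
    intro t
    by_cases h : x = 9
    · simp [pvBStep, pvConsumeTo9, h]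
    · simp [pvBStep, pvConsumeTo9, h, ih]

theorem pvAB (t : Int) (l : List Int) :
    pvALoop t l = (List.foldl pvBStep (false, t) l).2 := by
  induction t, l using pvALoop.induct with
  | case1 t => simp [pvALoop]
  | case2 t rest ih =>
    simp only [pvALoop, List.foldl, pvBStep]
    norm_num
    rw [pvB_skip]
    exact ih
  | case3 t x rest h ih =>
    simp only [pvALoop, List.foldl, pvBStep, if_neg h]
    exact ih

-- ===== VERDICT (by name: the statement is the Claim_ definition above) =====
theorem summer_69_Kelly2_spec : Claim_equal_summer_69_Kelly2 := by
  intro lst _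
  unfold Spec_summer_69_Kelly2 summer_69_Kelly2 summer_69_Kelly2_alt
  exact pvAB 0 lst
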